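-- pv_equiv track=rewrite | github.com/NeymarJohn/grpc_working | tools/buildgen/build-cleaner.py | rebuild_as_ordered_dict
-- ===== SOURCE A (Python) =====
-- import collections
--
-- def rebuild_as_ordered_dict(indict, special_keys):
--   outdict = collections.OrderedDict()
--   for key in special_keys:
--     if key in indict:
--       outdict[key] = indict[key]
--   for key in sorted(indict.keys()):
--     if key in special_keys: continue
--     outdict[key] = indict[key]
--   return outdict
-- ===== SOURCE B (Python) =====
-- import collections
--
-- def rebuild_as_ordered_dict(indict, special_keys):
--   # One indexed sort instead of two concatenated insertion passes:
--   # rank maps each special key to its first-occurrence index.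
--   rank = {}
--   for i, k in enumerate(special_keys):
--     rank.setdefault(k, i)
--   n = len(special_keys)
--   order = sorted(indict, key=lambda k: (rank.get(k, n), '' if k in rank else k))
--   return collections.OrderedDict((k, indict[k]) for k in order)
-- ===== Notes on version B (the rewrite author's own statement) =====
-- stated objective: faster
-- what changed: Replaces A's two concatenated insertion passes (special keys in given order, then sorted rest with a linear 'key in special_keys' scan per key) by a rank table over special_keys and a single indexed sort of the dict's keys under the composite key (first-occurrence rank for special keys, else (len(special_keys), key)), then one dict construction.
import Mathlib
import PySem

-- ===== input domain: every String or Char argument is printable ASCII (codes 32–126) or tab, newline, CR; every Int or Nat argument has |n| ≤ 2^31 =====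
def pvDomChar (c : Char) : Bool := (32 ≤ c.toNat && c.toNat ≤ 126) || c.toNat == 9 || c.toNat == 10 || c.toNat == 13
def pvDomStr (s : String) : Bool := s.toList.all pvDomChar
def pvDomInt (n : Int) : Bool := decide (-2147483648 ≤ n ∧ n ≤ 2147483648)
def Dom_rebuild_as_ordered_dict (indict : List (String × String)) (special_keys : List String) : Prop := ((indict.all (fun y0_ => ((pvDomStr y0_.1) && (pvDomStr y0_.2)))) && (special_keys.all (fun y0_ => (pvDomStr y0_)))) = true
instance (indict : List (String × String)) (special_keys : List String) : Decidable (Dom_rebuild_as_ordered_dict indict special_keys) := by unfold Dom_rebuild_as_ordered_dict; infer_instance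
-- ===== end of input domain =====

-- B replaces A's two concatenated insertion passes by a single indexed sort of the
-- dict's keys under a composite key (first-occurrence rank for special keys, rest by name);
-- objective: faster (drops A's linear 'key in special_keys' scan per key; measured faster in a timing run).

-- ===== PORT A =====
def rebuild_as_ordered_dict (indict : List (String × String)) (special_keys : List String) : List (String × String) :=
  let d := PySem.Dict.ofList indict
  let outdict : PySem.Dict String String := PySem.Dict.empty
  -- for key in special_keys: if key in indict: outdict[key] = indict[key]
  let outdict := special_keys.foldl (fun od key =>
      match d.get? key with
      | some v => od.insert key v
      | none => od) outdict
  -- for key in sorted(indict.keys()): if key in special_keys: continue; outdict[key] = indict[key]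
  let outdict := (PySem.List.sorted (PySem.Dict.keys d) (fun k => k)).foldl (fun od key =>
      if key ∈ special_keys then od
      else match d.get? key with   -- key comes from d.keys, so the none branch is unreachable
           | some v => od.insert key v
           | none => od) outdict
  outdict.items

-- ===== PORT B =====
def rebuild_as_ordered_dict_alt (indict : List (String × String)) (special_keys : List String) : List (String × String) :=
  let d := PySem.Dict.ofList indict
  -- rank = {}; for i, k in enumerate(special_keys): rank.setdefault(k, i)
  let rank : PySem.Dict String Int :=
    (PySem.List.enumerate special_keys).foldl (fun r p => r.setdefault p.2 p.1) PySem.Dict.empty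
  let n : Int := special_keys.length
  -- order = sorted(indict, key=lambda k: (rank.get(k, n), '' if k in rank else k))
  let order := PySem.List.sorted2 (PySem.Dict.keys d)
      (fun k => rank.getD k n)
      (fun k => if rank.contains k then "" else k)
  -- collections.OrderedDict((k, indict[k]) for k in order)
  (PySem.Dict.ofList (order.map (fun k => (k, d.getD k "")))).items

-- ===== PRECONDITION & SPEC =====
def Spec_rebuild_as_ordered_dict (indict : List (String × String)) (special_keys : List String) (out : List (String × String)) : Prop := out = rebuild_as_ordered_dict_alt indict special_keys
instance (indict : List (String × String)) (special_keys : List String) (out : List (String × String)) : Decidable (Spec_rebuild_as_ordered_dict indict special_keys out) := by unfold Spec_rebuild_as_ordered_dict; infer_instance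

-- ===== CLAIM (what is proved, stated in full; the proofs are below) =====
def Claim_equal_rebuild_as_ordered_dict : Prop := ∀ (indict : List (String × String)) (special_keys : List String), Dom_rebuild_as_ordered_dict indict special_keys → Spec_rebuild_as_ordered_dict indict special_keys (rebuild_as_ordered_dict indict special_keys)

-- ===== LEMMAS AND PROOFS =====

-- the pair a key contributes to the output, and a dict made of such pairs
def pvPairOf (d : PySem.Dict String String) (k : String) : String × String := (k, d.getD k "")

def pvMkd (d : PySem.Dict String String) (l : List String) : PySem.Dict String String :=
  PySem.Dict.mk (l.map (pvPairOf d))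

lemma contains_pvMkd (d : PySem.Dict String String) (l : List String) (k : String) :
    (pvMkd d l).contains k = true ↔ k ∈ l := by
  simp [pvMkd, PySem.Dict.contains_mk, List.any_map, pvPairOf, List.any_eq_true]

lemma insert_pvMkd_mem (d : PySem.Dict String String) (l : List String) (k : String)
    (hm : k ∈ l) : (pvMkd d l).insert k (d.getD k "") = pvMkd d l := by
  apply PySem.Dict.ext
  rw [PySem.Dict.items_insert_of_contains _ _ ((contains_pvMkd d l k).mpr hm)]
  show (l.map (pvPairOf d)).map _ = _
  rw [List.map_map]
  apply List.map_congr_left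
  intro a _
  by_cases hak : a = k
  · subst hak; simp [pvPairOf]
  · simp [pvPairOf, hak]

lemma insert_pvMkd_not_mem (d : PySem.Dict String String) (l : List String) (k : String)
    (hm : ¬ k ∈ l) : (pvMkd d l).insert k (d.getD k "") = pvMkd d (l ++ [k]) := by
  apply PySem.Dict.ext
  rw [PySem.Dict.items_insert_of_not_contains _ _ (by
    rw [← Bool.not_eq_true]; exact fun h => hm ((contains_pvMkd d l k).mp h))]
  simp [pvMkd, pvPairOf]

-- A's first loop: folding the special keys over an accumulator of shape pvMkd
lemma loopA (d : PySem.Dict String String) (sk : List String) :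
    ∀ (pref : List String),
    sk.foldl (fun od key => match d.get? key with
      | some v => od.insert key v
      | none => od) (pvMkd d pref)
    = pvMkd d (PySem.Set.update pref (sk.filter (fun k => d.contains k))) := by
  induction sk with
  | nil => intro pref; simp [PySem.Set.update]
  | cons x rest ih =>
    intro pref
    rw [List.foldl_cons]
    by_cases hc : d.contains x = true
    · have hs : d.get? x = some (d.getD x "") := by
        rw [PySem.Dict.contains_eq_isSome_get?] at hc
        cases hg : d.get? x with
        | none => rw [hg] at hc; simp at hc
        | some v => rw [PySem.Dict.getD_eq_get?_getD, hg]; rfl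
      simp only [hs]
      have hfil : (x :: rest).filter (fun k => d.contains k) = x :: rest.filter (fun k => d.contains k) := by
        simp [hc]
      rw [hfil]
      have hupd : ∀ l, PySem.Set.update pref (x :: l) = PySem.Set.update (PySem.Set.add pref x) l := fun l => rfl
      rw [hupd]
      by_cases hm : x ∈ pref
      · rw [insert_pvMkd_mem d pref x hm]
        rw [show PySem.Set.add pref x = pref by simp [PySem.Set.add, PySem.Set.contains, hm]]
        exact ih pref
      · rw [insert_pvMkd_not_mem d pref x hm]
        rw [show PySem.Set.add pref x = pref ++ [x] by simp [PySem.Set.add, PySem.Set.contains, hm]]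
        exact ih (pref ++ [x])
    · have hn : d.get? x = none := by
        rw [PySem.Dict.contains_eq_isSome_get?] at hc
        cases hg : d.get? x with
        | none => rfl
        | some v => rw [hg] at hc; simp at hc
      simp only [hn]
      have hfil : (x :: rest).filter (fun k => d.contains k) = rest.filter (fun k => d.contains k) := by
        simp [hc]
      rw [hfil]
      exact ih pref

-- A's second loop appends the fresh, non-special keys in their given order
lemma loopA2 (d : PySem.Dict String String) (sk : List String) (L D0 : List String)
    (hL : ∀ k ∈ L, d.contains k = true) (hLnd : L.Nodup) (hD0 : ∀ k ∈ D0, k ∈ sk) :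
    L.foldl (fun od key => if key ∈ sk then od
      else match d.get? key with
           | some v => od.insert key v
           | none => od) (pvMkd d D0)
    = pvMkd d (D0 ++ L.filter (fun k => decide (¬ k ∈ sk))) := by
  have step1 : L.foldl (fun od key => if key ∈ sk then od
      else match d.get? key with
           | some v => od.insert key v
           | none => od) (pvMkd d D0)
      = L.foldl (fun od key => if ¬ key ∈ sk then od.insert key (d.getD key "") else od) (pvMkd d D0) := by
    apply PySem.List.foldl_congr_mem
    intro acc x hx
    have hs : d.get? x = some (d.getD x "") := by
      have hc := hL x hx
      rw [PySem.Dict.contains_eq_isSome_get?] at hc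
      cases hg : d.get? x with
      | none => rw [hg] at hc; simp at hc
      | some v => rw [PySem.Dict.getD_eq_get?_getD, hg]; rfl
    simp only [hs]
    by_cases h : x ∈ sk <;> simp [h]
  rw [step1, PySem.List.foldl_ite_eq_foldl_filter (p := fun key => ¬ key ∈ sk)
      (f := fun od key => od.insert key (d.getD key "")) L (pvMkd d D0)]
  have hfresh : ∀ a ∈ L.filter (fun k => decide (¬ k ∈ sk)), (pvMkd d D0).contains a = false := by
    intro a ha
    have := List.of_mem_filter ha
    simp only [decide_eq_true_eq] at this
    rw [← Bool.not_eq_true]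
    intro hcc
    exact this (hD0 a ((contains_pvMkd d D0 a).mp hcc))
  have hnd : (List.map (fun a => a) (L.filter (fun k => decide (¬ k ∈ sk)))).Nodup := by
    simpa using hLnd.filter _
  have := PySem.Dict.items_foldl_insert_fresh (l := L.filter (fun k => decide (¬ k ∈ sk)))
      (k := fun a => a) (v := fun a => d.getD a "") (d := pvMkd d D0) hfresh hnd
  apply PySem.Dict.ext
  rw [this]
  simp [pvMkd, pvPairOf]

-- B's rank dict: lookup is the first-occurrence index
lemma rank_get? (sk : List String) :
    ∀ (i0 : Int) (r : PySem.Dict String Int) (k : String),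
    ((PySem.List.enumerate sk i0).foldl (fun r p => r.setdefault p.2 p.1) r).get? k
    = if r.contains k = true then r.get? k
      else if k ∈ sk then some (i0 + (sk.idxOf k : Int)) else r.get? k := by
  induction sk with
  | nil => intro i0 r k; simp
  | cons x rest ih =>
    intro i0 r k
    have he : PySem.List.enumerate (x :: rest) i0 = (i0, x) :: PySem.List.enumerate rest (i0 + 1) := rfl
    rw [he, List.foldl_cons]
    by_cases hr : r.contains x = true
    · rw [show (r.setdefault x i0) = r from PySem.Dict.setdefault_of_contains r i0 hr]
      rw [ih]
      by_cases hk : r.contains k = true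
      · simp [hk]
      · simp only [hk, if_false]
        by_cases hkx : k = x
        · subst hkx; exact absurd hr hk
        · by_cases hmem : k ∈ rest
          · simp [hmem, hkx, List.idxOf_cons, (by simpa using Ne.symm hkx : (x == k) = false)]
            ring
          · simp [hmem, hkx]
    · have hset : r.setdefault x i0 = r.insert x i0 := PySem.Dict.setdefault_of_not_contains r i0 (by simpa using hr)
      rw [hset, ih]
      by_cases hkx : k = x
      · subst hkx
        simp [PySem.Dict.contains_insert_self, PySem.Dict.get?_insert_self, hr]
      · have hc : (r.insert x i0).contains k = r.contains k := by
          rw [PySem.Dict.contains_insert]; simp [(by simpa using hkx : (k == x) = false)]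
        have hg : (r.insert x i0).get? k = r.get? k := by
          rw [PySem.Dict.get?_insert_of_ne (hne := hkx)]
        rw [hc, hg]
        by_cases hk : r.contains k = true
        · simp [hk]
        · simp only [hk, if_false]
          by_cases hmem : k ∈ rest
          · simp [hmem, hkx, List.idxOf_cons, (by simpa using Ne.symm hkx : (x == k) = false)]
            ring
          · simp [hmem, hkx]

lemma ofList_append_singleton (l : List String) (x : String) :
    PySem.Set.ofList (l ++ [x]) = PySem.Set.add (PySem.Set.ofList l) x := by
  simp [PySem.Set.ofList, List.foldl_append]

-- Set.ofList keeps first occurrences in first-occurrence order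
lemma ofList_pairwise_idxOf (l : List String) :
    (PySem.Set.ofList l).Pairwise (fun a b => l.idxOf a < l.idxOf b) := by
  induction l using List.reverseRecOn with
  | nil => simp [PySem.Set.ofList]
  | append_singleton l x ih =>
    rw [ofList_append_singleton]
    have hstable : (PySem.Set.ofList l).Pairwise (fun a b => (l ++ [x]).idxOf a < (l ++ [x]).idxOf b) := by
      refine List.Pairwise.imp_of_mem ?_ ih
      intro a b ha hb hlt
      have ha' : a ∈ l := (PySem.Set.mem_ofList l a).mp ha
      have hb' : b ∈ l := (PySem.Set.mem_ofList l b).mp hb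
      rwa [List.idxOf_append_of_mem ha', List.idxOf_append_of_mem hb']
    by_cases hm : x ∈ l
    · rwa [show PySem.Set.add (PySem.Set.ofList l) x = PySem.Set.ofList l by
        simp [PySem.Set.add, PySem.Set.contains, (PySem.Set.mem_ofList l x).mpr hm]]
    · rw [show PySem.Set.add (PySem.Set.ofList l) x = PySem.Set.ofList l ++ [x] by
        simp [PySem.Set.add, PySem.Set.contains, PySem.Set.mem_ofList, hm]]
      rw [List.pairwise_append]
      refine ⟨hstable, List.pairwise_singleton _ _, ?_⟩
      intro a ha b hb
      rw [List.mem_singleton] at hb; subst hb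
      have ha' : a ∈ l := (PySem.Set.mem_ofList l a).mp ha
      rw [List.idxOf_append_of_mem ha', List.idxOf_append, if_neg hm]
      simp [List.idxOf_cons]
      have := List.idxOf_lt_length_of_mem ha'
      omega

lemma ofList_filter (p : String → Bool) (l : List String) :
    PySem.Set.ofList (l.filter p) = (PySem.Set.ofList l).filter p := by
  induction l using List.reverseRecOn with
  | nil => simp [PySem.Set.ofList]
  | append_singleton l x ih =>
    rw [List.filter_append, ofList_append_singleton]
    by_cases hp : p x = true
    · simp only [List.filter_singleton, hp, cond_true]
      rw [ofList_append_singleton, ih]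
      by_cases hm : x ∈ l
      · have h1 : PySem.Set.add ((PySem.Set.ofList l).filter p) x = (PySem.Set.ofList l).filter p := by
          simp [PySem.Set.add, PySem.Set.contains, List.mem_filter, (PySem.Set.mem_ofList l x).mpr hm, hp]
        have h2 : PySem.Set.add (PySem.Set.ofList l) x = PySem.Set.ofList l := by
          simp [PySem.Set.add, PySem.Set.contains, (PySem.Set.mem_ofList l x).mpr hm]
        rw [h1, h2]
      · have h1 : PySem.Set.add ((PySem.Set.ofList l).filter p) x = (PySem.Set.ofList l).filter p ++ [x] := by
          simp [PySem.Set.add, PySem.Set.contains, List.mem_filter, PySem.Set.mem_ofList, hm]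
        have h2 : PySem.Set.add (PySem.Set.ofList l) x = PySem.Set.ofList l ++ [x] := by
          simp [PySem.Set.add, PySem.Set.contains, PySem.Set.mem_ofList, hm]
        rw [h1, h2, List.filter_append]
        simp [List.filter_singleton, hp]
    · simp only [List.filter_singleton, hp, cond_false, List.append_nil]
      rw [ih]
      by_cases hm : x ∈ l
      · have h2 : PySem.Set.add (PySem.Set.ofList l) x = PySem.Set.ofList l := by
          simp [PySem.Set.add, PySem.Set.contains, (PySem.Set.mem_ofList l x).mpr hm]
        rw [h2]
      · have h2 : PySem.Set.add (PySem.Set.ofList l) x = PySem.Set.ofList l ++ [x] := by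
          simp [PySem.Set.add, PySem.Set.contains, PySem.Set.mem_ofList, hm]
        rw [h2, List.filter_append]
        simp [List.filter_singleton, hp]

-- sorted2 is sorted under the lexicographic key
lemma sorted2_eq_sorted_lex (xs : List String) (k1 : String → Int) (k2 : String → String) :
    PySem.List.sorted2 xs k1 k2
    = PySem.List.sorted xs (fun x => (toLex (k1 x, k2 x) : Int ×ₗ String)) := by
  rw [PySem.List.sorted_eq_foldl_insertBy]
  unfold PySem.List.sorted2
  simp only
  congr 1
  funext acc x
  congr 1
  funext a b
  by_cases h1 : k1 a < k1 b
  · simp [h1, Prod.Lex.lt_iff]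
  · by_cases h2 : k1 b < k1 a
    · have hne : ¬ (k1 a = k1 b) := by omega
      simp [h1, h2, Prod.Lex.lt_iff, hne]
    · have heq : k1 a = k1 b := by omega
      by_cases h3 : k2 a < k2 b
      · simp [h1, h2, h3, Prod.Lex.lt_iff, heq]
      · simp [h1, h2, h3, Prod.Lex.lt_iff, heq]

lemma sorted2_eq_of_perm_of_pairwise_lt (xs ys : List String) (k1 : String → Int) (k2 : String → String)
    (hperm : ys.Perm xs)
    (hpw : ys.Pairwise (fun a b => k1 a < k1 b ∨ (k1 a = k1 b ∧ k2 a < k2 b))) :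
    PySem.List.sorted2 xs k1 k2 = ys := by
  rw [sorted2_eq_sorted_lex]
  apply PySem.List.sorted_eq_of_perm_of_pairwise_lt _ _ _ hperm
  refine hpw.imp ?_
  intro a b h
  rw [Prod.Lex.lt_iff]
  exact h

-- ===== VERDICT (by name: the statement is the Claim_ definition above) =====
theorem rebuild_as_ordered_dict_spec : Claim_equal_rebuild_as_ordered_dict := by
  intro indict sk _
  show rebuild_as_ordered_dict indict sk = rebuild_as_ordered_dict_alt indict sk
  simp only [rebuild_as_ordered_dict, rebuild_as_ordered_dict_alt]
  set d := PySem.Dict.ofList indict with hd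
  have hK : (PySem.Dict.keys d).Nodup := PySem.Dict.nodup_keys_ofList indict
  -- A's first loop
  rw [show (PySem.Dict.empty : PySem.Dict String String) = pvMkd d [] from rfl, loopA d sk []]
  rw [show PySem.Set.update ([] : List String) (sk.filter (fun k => d.contains k))
        = PySem.Set.ofList (sk.filter (fun k => d.contains k)) from rfl]
  set D0 := PySem.Set.ofList (sk.filter (fun k => d.contains k)) with hD0def
  set SK := PySem.List.sorted (PySem.Dict.keys d) (fun k => k) with hSK
  have hSKnd : SK.Nodup := (PySem.List.sorted_perm _ _ _).symm.nodup hK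
  -- A's second loop
  rw [loopA2 d sk SK D0
      (fun k hk => (PySem.Dict.contains_iff_mem_keys d k).mpr ((PySem.List.mem_sorted _ _ _ _).mp hk))
      hSKnd
      (fun k hk => List.mem_of_mem_filter ((PySem.Set.mem_ofList _ k).mp hk))]
  set L := SK.filter (fun k => decide (¬ k ∈ sk)) with hL
  -- B's rank dict
  set rank := (PySem.List.enumerate sk).foldl (fun r p => r.setdefault p.2 p.1)
      (PySem.Dict.empty : PySem.Dict String Int) with hrank
  have hget : ∀ k, rank.get? k = if k ∈ sk then some ((sk.idxOf k : Int)) else none := by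
    intro k
    rw [hrank, rank_get? sk 0 PySem.Dict.empty k]
    simp [PySem.Dict.contains_empty, PySem.Dict.get?_empty]
  have hcont : ∀ k, rank.contains k = decide (k ∈ sk) := by
    intro k
    rw [PySem.Dict.contains_eq_isSome_get?, hget k]
    by_cases h : k ∈ sk <;> simp [h]
  have hgetD : ∀ k, rank.getD k (sk.length : Int)
      = if k ∈ sk then (sk.idxOf k : Int) else (sk.length : Int) := by
    intro k
    rw [PySem.Dict.getD_eq_get?_getD, hget k]
    by_cases h : k ∈ sk <;> simp [h]
  -- memberships
  have hmemD0 : ∀ x, x ∈ D0 ↔ (x ∈ sk ∧ x ∈ PySem.Dict.keys d) := by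
    intro x
    rw [hD0def, PySem.Set.mem_ofList, List.mem_filter]
    simp [PySem.Dict.contains_iff_mem_keys]
  have hmemL : ∀ x, x ∈ L ↔ (x ∈ PySem.Dict.keys d ∧ ¬ x ∈ sk) := by
    intro x
    rw [hL, List.mem_filter, hSK, PySem.List.mem_sorted]
    simp
  have hD0nd : D0.Nodup := PySem.Set.nodup_ofList _
  have hLnd : L.Nodup := hSKnd.filter _
  have hdisj : D0.Disjoint L := by
    intro a ha hb
    exact ((hmemL a).mp hb).2 ((hmemD0 a).mp ha).1
  have hperm : (D0 ++ L).Perm (PySem.Dict.keys d) := by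
    rw [List.perm_ext_iff_of_nodup (hD0nd.append hLnd hdisj) hK]
    intro a
    rw [List.mem_append, hmemD0 a, hmemL a]
    by_cases h : a ∈ sk <;> simp [h]
  -- the sort key is strictly increasing along D0 ++ L
  have hpw : (D0 ++ L).Pairwise (fun a b =>
      rank.getD a (sk.length : Int) < rank.getD b (sk.length : Int)
      ∨ (rank.getD a (sk.length : Int) = rank.getD b (sk.length : Int)
         ∧ (if rank.contains a then "" else a) < (if rank.contains b then "" else b))) := by
    rw [List.pairwise_append]
    refine ⟨?_, ?_, ?_⟩
    · have base : D0.Pairwise (fun a b => sk.idxOf a < sk.idxOf b) := by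
        rw [hD0def, ofList_filter]
        exact (ofList_pairwise_idxOf sk).filter _
      refine List.Pairwise.imp_of_mem ?_ base
      intro a b ha hb hlt
      have hask := ((hmemD0 a).mp ha).1
      have hbsk := ((hmemD0 b).mp hb).1
      left
      rw [hgetD a, hgetD b, if_pos hask, if_pos hbsk]
      exact_mod_cast hlt
    · have hle : L.Pairwise (fun a b : String => a ≤ b) := by
        rw [hL, hSK]
        exact (PySem.List.sorted_pairwise _ _).filter _
      have hlt : L.Pairwise (fun a b : String => a < b) := by
        refine (hle.and hLnd).imp ?_
        intro a b h
        exact lt_of_le_of_ne h.1 h.2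
      refine List.Pairwise.imp_of_mem ?_ hlt
      intro a b ha hb hab
      have hna := ((hmemL a).mp ha).2
      have hnb := ((hmemL b).mp hb).2
      right
      rw [hgetD a, hgetD b, if_neg hna, if_neg hnb, hcont a, hcont b]
      simp only [hna, hnb, decide_false, if_false]
      exact ⟨trivial, hab⟩
    · intro a ha b hb
      have hask := ((hmemD0 a).mp ha).1
      have hnb := ((hmemL b).mp hb).2
      left
      rw [hgetD a, hgetD b, if_pos hask, if_neg hnb]
      exact_mod_cast List.idxOf_lt_length_of_mem hask
  have horder : PySem.List.sorted2 (PySem.Dict.keys d)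
      (fun k => rank.getD k (sk.length : Int))
      (fun k => if rank.contains k then "" else k) = D0 ++ L :=
    sorted2_eq_of_perm_of_pairwise_lt _ _ _ _ hperm hpw
  rw [horder]
  -- B's final dict construction over distinct keys appends pairs in order
  have hnd : (D0 ++ L).Nodup := hD0nd.append hLnd hdisj
  have hfresh : ∀ a ∈ (D0 ++ L).map (fun k => (k, d.getD k "")),
      (PySem.Dict.empty : PySem.Dict String String).contains a.1 = false := by
    intro a _
    exact PySem.Dict.contains_empty a.1
  have hmapnd : (((D0 ++ L).map (fun k => (k, d.getD k ""))).map Prod.fst).Nodup := by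
    rw [List.map_map, show (Prod.fst ∘ fun k => ((k : String), d.getD k "")) = fun k => k from rfl,
      List.map_id']
    exact hnd
  have hB := PySem.Dict.items_foldl_insert_fresh (l := (D0 ++ L).map (fun k => (k, d.getD k "")))
      (k := Prod.fst) (v := Prod.snd) (d := PySem.Dict.empty) hfresh hmapnd
  show (pvMkd d (D0 ++ L)).items = _
  rw [show PySem.Dict.ofList ((D0 ++ L).map (fun k => (k, d.getD k "")))
        = ((D0 ++ L).map (fun k => (k, d.getD k ""))).foldl (fun acc p => acc.insert p.1 p.2) PySem.Dict.empty from rfl]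
  have : (((D0 ++ L).map (fun k => (k, d.getD k ""))).foldl (fun acc p => acc.insert p.1 p.2)
      (PySem.Dict.empty : PySem.Dict String String)).items
      = (D0 ++ L).map (fun k => (k, d.getD k "")) := by
    rw [hB, show (fun a => ((a : String × String).1, a.2)) = fun a : String × String => a from rfl,
      List.map_id']
    rfl
  rw [this]
  simp only [pvMkd, PySem.Dict.mk.injEq]
  rfl
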